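-- pv_equiv track=rewrite | github.com/syurskyi/Algorithms_and_Data_Structure | _algorithms_challenges/w3resource/Practice_python-master/python_math.py | sum_squared_diffrence
-- ===== SOURCE A (Python) =====
-- def sum_squared_diffrence(n=2):
--     """ calculate difference between squared sum of first n
--     natural numbers and sum of squared first n natural numbers.
--     """
--     sums = 0
--     sum_squared = 0
--     for num in range(1, n+1):
--         sums += num
--         num2 = num ** 2
--         sum_squared += num2
--     squared_sum = sums ** 2
--     return squared_sum - sum_squared
-- ===== SOURCE B (Python) =====
-- def sum_squared_diffrence(n=2):
--     m = n if n > 0 else 0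
--     s = m * (m + 1) // 2
--     sq = m * (m + 1) * (2 * m + 1) // 6
--     return s * s - sq
-- ===== Notes on version B (the rewrite author's own statement) =====
-- stated objective: faster
-- what changed: Replaced the linear accumulation loop by the closed-form arithmetic-series formulas for the sum and the sum of squares.
import Mathlib
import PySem

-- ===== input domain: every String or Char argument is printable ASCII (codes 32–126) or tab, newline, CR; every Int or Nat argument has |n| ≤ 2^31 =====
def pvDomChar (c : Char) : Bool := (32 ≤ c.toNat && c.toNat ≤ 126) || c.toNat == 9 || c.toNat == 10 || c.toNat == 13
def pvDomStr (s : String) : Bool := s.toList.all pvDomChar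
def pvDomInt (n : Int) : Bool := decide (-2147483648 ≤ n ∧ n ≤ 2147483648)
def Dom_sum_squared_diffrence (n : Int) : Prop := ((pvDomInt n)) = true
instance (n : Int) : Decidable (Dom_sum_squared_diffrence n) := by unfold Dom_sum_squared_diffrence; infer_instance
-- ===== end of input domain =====

-- B replaces A's O(n) accumulation loop by the closed-form series formulas (faster).


-- ===== PORT A =====
def sum_squared_diffrence (n : Int) : Int :=
  let st := (PySem.List.pyRange 1 (n + 1) 1).foldl
    (fun (st : Int × Int) num => (st.1 + num, st.2 + num ^ 2)) (0, 0)
  st.1 ^ 2 - st.2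

-- ===== PORT B =====
def sum_squared_diffrence_alt (n : Int) : Int :=
  let m := if n > 0 then n else 0
  let s := PySem.Int.floordiv (m * (m + 1)) 2
  let sq := PySem.Int.floordiv (m * (m + 1) * (2 * m + 1)) 6
  s * s - sq

-- ===== PRECONDITION & SPEC =====
def Spec_sum_squared_diffrence (n : Int) (out : Int) : Prop := out = sum_squared_diffrence_alt n
instance (n : Int) (out : Int) : Decidable (Spec_sum_squared_diffrence n out) := by unfold Spec_sum_squared_diffrence; infer_instance

-- ===== CLAIM (what is proved, stated in full; the proofs are below) =====
def Claim_equal_sum_squared_diffrence : Prop := ∀ (n : Int), Dom_sum_squared_diffrence n → Spec_sum_squared_diffrence n (sum_squared_diffrence n)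

-- ===== LEMMAS AND PROOFS =====

-- the loop pair multiplied out: 2*sums = m(m+1) and 6*sum_squared = m(m+1)(2m+1)
theorem pv_loop_closed (m : Nat) :
    2 * (((List.range m).map (fun k : Nat => (1:Int) + k)).foldl
        (fun (st : Int × Int) num => (st.1 + num, st.2 + num ^ 2)) (0, 0)).1
      = (m : Int) * (m + 1) ∧
    6 * (((List.range m).map (fun k : Nat => (1:Int) + k)).foldl
        (fun (st : Int × Int) num => (st.1 + num, st.2 + num ^ 2)) (0, 0)).2
      = (m : Int) * (m + 1) * (2 * m + 1) := by
  induction m with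
  | zero => simp
  | succ m ih =>
    obtain ⟨ih1, ih2⟩ := ih
    rw [List.range_succ, List.map_append, List.foldl_append]
    simp only [List.map_cons, List.map_nil, List.foldl_cons, List.foldl_nil]
    push_cast
    constructor
    · linear_combination ih1
    · linear_combination ih2

theorem pv_floordiv_mul_cancel (c x : Int) (hc : 0 < c) :
    PySem.Int.floordiv (c * x) c = x := by
  rw [PySem.Int.floordiv_eq_ediv_of_pos hc, Int.mul_ediv_cancel_left x (by omega)]

-- ===== VERDICT (by name: the statement is the Claim_ definition above) =====
theorem sum_squared_diffrence_spec : Claim_equal_sum_squared_diffrence := by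
  unfold Claim_equal_sum_squared_diffrence
  intro n _
  unfold Spec_sum_squared_diffrence sum_squared_diffrence sum_squared_diffrence_alt
  have hm : (if n > 0 then n else 0) = ((n.toNat : Nat) : Int) := by
    split_ifs with h <;> omega
  rw [PySem.List.pyRange_one]
  have hb : (n + 1 - 1).toNat = n.toNat := by omega
  rw [hb]
  obtain ⟨h1, h2⟩ := pv_loop_closed n.toNat
  simp only [hm]
  rw [← h2, ← h1, pv_floordiv_mul_cancel 2 _ (by omega),
      pv_floordiv_mul_cancel 6 _ (by omega)]
  ring
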